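-- pv_equiv track=rewrite | github.com/SuperFuels/COMDEX | backend/modules/glyphos/glyph_registry_updater.py | extract_lemma_and_def
-- ===== SOURCE A (Python) =====
-- from typing import Dict, Any
--
-- def extract_lemma_and_def(content: str) -> Dict[str, Any]:
--     lemma, definition = None, None
--     for line in content.splitlines():
--         s = line.strip()
--         if s.startswith("lemma:"):
--             lemma = s.split("lemma:", 1)[1].strip().strip("'\"")
--         elif s.startswith("- ") and not definition:
--             # first definition bullet only
--             definition = s[2:].strip()
--     return {"lemma": lemma, "definition": definition or ""}
-- ===== SOURCE B (Python) =====
-- def extract_lemma_and_def(content: str):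
--     lines = [line.strip() for line in content.splitlines()]
--     definition = next((s[2:].strip() for s in lines if s.startswith("- ")), "")
--     lemma = None
--     for s in reversed(lines):
--         if s.startswith("lemma:"):
--             lemma = s.split("lemma:", 1)[1].strip().strip("'\"")
--             break
--     return {"lemma": lemma, "definition": definition}
-- ===== Notes on version B (the rewrite author's own statement) =====
-- stated objective: simpler
-- what changed: A's single loop threading a (lemma, definition) state pair with an order-dependent elif is replaced by two independent extractions over the stripped lines: the first '- ' bullet via find?, and the last 'lemma:' line via the first hit on the reversed list.
import Mathlib
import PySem

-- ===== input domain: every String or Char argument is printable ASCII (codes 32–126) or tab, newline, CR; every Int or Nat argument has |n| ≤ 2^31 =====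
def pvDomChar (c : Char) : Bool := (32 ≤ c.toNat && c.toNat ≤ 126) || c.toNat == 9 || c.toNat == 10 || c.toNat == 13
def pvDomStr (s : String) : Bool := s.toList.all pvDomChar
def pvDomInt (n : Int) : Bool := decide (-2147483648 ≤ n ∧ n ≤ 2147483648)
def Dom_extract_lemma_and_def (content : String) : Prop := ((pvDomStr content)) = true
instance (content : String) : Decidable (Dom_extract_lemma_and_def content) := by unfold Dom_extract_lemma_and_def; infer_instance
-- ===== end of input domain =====

-- B replaces A's single interleaved loop-with-state by two independent extractions
-- over the stripped lines (first '- ' bullet; last 'lemma:' line found by scanning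
-- the reversed list): objective 'simpler', no speed claim.

-- Shared transcription of the extraction expressions both Pythons contain verbatim:
-- s.split("lemma:", 1)[1].strip().strip("'\"")  — the [1] exists whenever s starts
-- with "lemma:", so the pyGetD default "" is never used on the reachable path.
def pvLemmaVal (s : String) : String :=
  PySem.Str.stripChars
    (PySem.Str.strip (PySem.List.pyGetD ((PySem.Str.splitMax? s "lemma:" 1).getD []) 1 ""))
    "'\""

-- s[2:].strip()
def pvDefVal (s : String) : String :=
  PySem.Str.strip (PySem.Str.slice s (some 2) none)

-- ===== PORT A =====
-- literal transcription of A's loop: state = (lemma, definition), branches in order;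
-- Python's truthiness 'not definition' is: definition is None or "".
def pvStepA (st : Option String × Option String) (line : String) :
    Option String × Option String :=
  let s := PySem.Str.strip line
  if PySem.Str.startswith s "lemma:" then
    (some (pvLemmaVal s), st.2)
  else if PySem.Str.startswith s "- " && (st.2.getD "" == "") then
    (st.1, some (pvDefVal s))
  else st

def extract_lemma_and_def (content : String) : List (String × Option String) :=
  let r := (PySem.Str.splitlines content).foldl pvStepA (none, none)
  -- Python's 'definition or ""' maps None and "" both to "": that is r.2.getD ""
  -- (a stored "" yields "" either way).
  [("lemma", r.1), ("definition", some (r.2.getD ""))]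

-- ===== PORT B =====
def extract_lemma_and_def_alt (content : String) : List (String × Option String) :=
  let lines := (PySem.Str.splitlines content).map PySem.Str.strip
  -- next((s[2:].strip() for s in lines if s.startswith("- ")), "")
  let definition := ((lines.find? (fun s => PySem.Str.startswith s "- ")).map pvDefVal).getD ""
  -- for s in reversed(lines): first hit wins, then break
  let lem := (lines.reverse.find? (fun s => PySem.Str.startswith s "lemma:")).map pvLemmaVal
  [("lemma", lem), ("definition", some definition)]

-- ===== PRECONDITION & SPEC =====
def Spec_extract_lemma_and_def (content : String) (out : List (String × Option String)) : Prop := out = extract_lemma_and_def_alt content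
instance (content : String) (out : List (String × Option String)) : Decidable (Spec_extract_lemma_and_def content out) := by unfold Spec_extract_lemma_and_def; infer_instance

-- ===== CLAIM (what is proved, stated in full; the proofs are below) =====
def Claim_equal_extract_lemma_and_def : Prop := ∀ (content : String), Dom_extract_lemma_and_def content → Spec_extract_lemma_and_def content (extract_lemma_and_def content)

-- ===== LEMMAS AND PROOFS =====

-- A string is stripped to [] exactly when it is all whitespace.
theorem pv_strip_eq_nil_iff (l : List Char) :
    PySem.Chars.strip l = [] ↔ ∀ c ∈ l, PySem.Chars.isspace c = true := by
  simp only [PySem.Chars.strip, PySem.Chars.rstrip, PySem.Chars.lstrip,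
    List.reverse_eq_nil_iff, List.dropWhile_eq_nil_iff, List.mem_reverse]
  constructor
  · intro h c hc
    rcases List.mem_append.1
        (by rw [List.takeWhile_append_dropWhile (p := PySem.Chars.isspace) (l := l)];
            exact hc) with h1 | h2
    · exact List.mem_takeWhile_imp h1
    · exact h _ h2
  · intro h c hc
    have : c ∈ l := (List.dropWhile_sublist (p := PySem.Chars.isspace) (l := l)).mem hc
    exact h c this

-- The result of strip ends in a non-space character (when nonempty).
theorem pv_strip_last_not_space (l : List Char) (h : PySem.Chars.strip l ≠ []) :
    PySem.Chars.isspace ((PySem.Chars.strip l).getLast h) = false := by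
  simp only [PySem.Chars.strip, PySem.Chars.rstrip] at h ⊢
  rw [List.getLast_reverse h]
  exact List.head_dropWhile_not _ _

-- On a stripped line that is a "- " bullet, the extracted definition is nonempty.
theorem pv_defVal_ne_empty (line : String)
    (h : PySem.Str.startswith (PySem.Str.strip line) "- " = true) :
    pvDefVal (PySem.Str.strip line) ≠ "" := by
  unfold pvDefVal
  have hr : (PySem.Str.strip line).toList = PySem.Chars.strip line.toList := by simp
  rw [PySem.Str.startswith_eq, PySem.Chars.startswith_iff, hr] at h
  intro hcon
  have hcl : (PySem.Str.strip
      (PySem.Str.slice (PySem.Str.strip line) (some 2) none)).toList = [] := by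
    rw [hcon]; rfl
  rw [PySem.Str.toList_strip, PySem.Str.toList_slice, PySem.Chars.slice_eq_listSlice, hr] at hcl
  obtain ⟨t, ht⟩ := h
  have ht' : PySem.Chars.strip line.toList = '-' :: ' ' :: t := by simpa using ht.symm
  have hslice : PySem.List.slice (PySem.Chars.strip line.toList) (some 2) none = t := by
    rw [ht', PySem.List.slice_from _ (by norm_num)]; rfl
  rw [hslice] at hcl
  have hall : ∀ c ∈ t, PySem.Chars.isspace c = true := (pv_strip_eq_nil_iff t).1 hcl
  have hne : PySem.Chars.strip line.toList ≠ [] := by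
    rw [ht']; exact List.cons_ne_nil _ _
  have hlast := pv_strip_last_not_space line.toList hne
  rcases List.eq_nil_or_concat t with rfl | ⟨t', c, rfl⟩
  · rw [List.getLast_congr _ (List.cons_ne_nil _ _) ht'] at hlast
    simp [PySem.Chars.isspace] at hlast
  · have : (PySem.Chars.strip line.toList).getLast hne = c := by
      rw [List.getLast_congr _ (List.cons_ne_nil _ _) ht']
      simp
    rw [this] at hlast
    exact absurd (hall c (by simp)) (by simp [hlast])

-- A "lemma:" line is not a "- " bullet.
theorem pv_lem_not_def (s : String) (h : PySem.Str.startswith s "lemma:" = true) :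
    PySem.Str.startswith s "- " = false := by
  rw [PySem.Str.startswith_eq, PySem.Chars.startswith_iff] at h
  rw [PySem.Str.startswith_eq]
  by_contra hc
  rw [Bool.not_eq_false, PySem.Chars.startswith_iff] at hc
  obtain ⟨t1, ht1⟩ := h
  obtain ⟨t2, ht2⟩ := hc
  rw [← ht2] at ht1
  simp at ht1

-- Invariant on the definition slot: never a stored "".
def pvInv (o : Option String) : Prop := o = none ∨ ∃ x, o = some x ∧ x ≠ ""

-- Characterisation of A's fold.
theorem pv_fold_char (ls : List String) (st : Option String × Option String)
    (hst : pvInv st.2) :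
    (ls.foldl pvStepA st).1 =
      (((ls.map PySem.Str.strip).reverse.find?
          (fun s => PySem.Str.startswith s "lemma:")).map pvLemmaVal).or st.1
    ∧ (ls.foldl pvStepA st).2 =
      st.2.or (((ls.map PySem.Str.strip).find?
          (fun s => PySem.Str.startswith s "- ")).map pvDefVal) := by
  induction ls generalizing st with
  | nil => simp
  | cons line rest ih =>
    simp only [List.foldl_cons, List.map_cons, List.reverse_cons, List.find?_append]
    by_cases hl : PySem.Str.startswith (PySem.Str.strip line) "lemma:" = true
    · have hd : PySem.Str.startswith (PySem.Str.strip line) "- " = false :=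
        pv_lem_not_def _ hl
      have hstep : pvStepA st line = (some (pvLemmaVal (PySem.Str.strip line)), st.2) := by
        simp only [pvStepA, hl]; rfl
      have hf1 : List.find? (fun s => PySem.Str.startswith s "lemma:") [PySem.Str.strip line]
          = some (PySem.Str.strip line) := List.find?_cons_of_pos hl
      have hf2 : List.find? (fun s => PySem.Str.startswith s "- ")
          (PySem.Str.strip line :: rest.map PySem.Str.strip)
          = List.find? (fun s => PySem.Str.startswith s "- ") (rest.map PySem.Str.strip) :=
        List.find?_cons_of_neg (by simp only [hd]; exact Bool.false_ne_true)
      rw [hstep]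
      obtain ⟨ih1, ih2⟩ := ih (some (pvLemmaVal (PySem.Str.strip line)), st.2) hst
      refine ⟨?_, ?_⟩
      · rw [ih1, hf1, Option.map_or, Option.map_some, Option.or_assoc, Option.some_or]
      · rw [ih2, hf2]
    · have hl' : PySem.Str.startswith (PySem.Str.strip line) "lemma:" = false :=
        Bool.not_eq_true _ ▸ (by simpa using hl)
      have hf1 : List.find? (fun s => PySem.Str.startswith s "lemma:") [PySem.Str.strip line]
          = none :=
        List.find?_cons_of_neg (by simp only [hl']; exact Bool.false_ne_true)
      by_cases hd : PySem.Str.startswith (PySem.Str.strip line) "- " = true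
      · have hf2 : List.find? (fun s => PySem.Str.startswith s "- ")
            (PySem.Str.strip line :: rest.map PySem.Str.strip)
            = some (PySem.Str.strip line) := List.find?_cons_of_pos hd
        rcases hst with h0 | ⟨x, hx, hxne⟩
        · have hstep : pvStepA st line = (st.1, some (pvDefVal (PySem.Str.strip line))) := by
            simp only [pvStepA, hl', hd, h0]; rfl
          rw [hstep]
          obtain ⟨ih1, ih2⟩ :=
            ih (st.1, some (pvDefVal (PySem.Str.strip line)))
              (Or.inr ⟨_, rfl, pv_defVal_ne_empty line hd⟩)
          refine ⟨?_, ?_⟩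
          · rw [ih1, hf1, Option.or_none]
          · rw [ih2, hf2, h0, Option.none_or, Option.map_some, Option.some_or]
        · have hgd : (st.2.getD "" == "") = false := by
            rw [hx]; simpa using hxne
          have hstep : pvStepA st line = st := by
            simp only [pvStepA, hl', hd, hgd]; rfl
          rw [hstep]
          obtain ⟨ih1, ih2⟩ := ih st (Or.inr ⟨x, hx, hxne⟩)
          refine ⟨?_, ?_⟩
          · rw [ih1, hf1, Option.or_none]
          · rw [ih2, hf2, hx, Option.some_or, Option.map_some, Option.some_or]
      · have hd' : PySem.Str.startswith (PySem.Str.strip line) "- " = false :=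
          Bool.not_eq_true _ ▸ (by simpa using hd)
        have hf2 : List.find? (fun s => PySem.Str.startswith s "- ")
            (PySem.Str.strip line :: rest.map PySem.Str.strip)
            = List.find? (fun s => PySem.Str.startswith s "- ") (rest.map PySem.Str.strip) :=
          List.find?_cons_of_neg (by simp only [hd']; exact Bool.false_ne_true)
        have hstep : pvStepA st line = st := by
          simp only [pvStepA, hl', hd']; rfl
        rw [hstep]
        obtain ⟨ih1, ih2⟩ := ih st hst
        refine ⟨?_, ?_⟩
        · rw [ih1, hf1, Option.or_none]
        · rw [ih2, hf2]

-- ===== VERDICT (by name: the statement is the Claim_ definition above) =====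
theorem extract_lemma_and_def_spec : Claim_equal_extract_lemma_and_def := by
  intro content _
  unfold Spec_extract_lemma_and_def extract_lemma_and_def extract_lemma_and_def_alt
  obtain ⟨h1, h2⟩ := pv_fold_char (PySem.Str.splitlines content) (none, none) (Or.inl rfl)
  simp only [h1, h2, Option.or_none, Option.none_or]
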